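-- pv_equiv track=rewrite | github.com/jhrcook/advent-of-code_2019 | challenges/06_challenge.py | count_direct_and_indirect_orbits
-- ===== SOURCE A (Python) =====
-- OrbitGraph = dict[str, list[str]]
--
-- def count_direct_and_indirect_orbits(planet: str, orbit_graph: OrbitGraph) -> int:
--     orbiting_planets = orbit_graph.get(planet)
--     if orbiting_planets is None:
--         return 0
--     n_orbits = len(orbiting_planets)
--     for orbiting_planet in orbiting_planets:
--         n_orbits += count_direct_and_indirect_orbits(orbiting_planet, orbit_graph)
--     return n_orbits
-- ===== SOURCE B (Python) =====
-- def count_direct_and_indirect_orbits(planet, orbit_graph):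
--     counts = {}
--     for _ in range(len(orbit_graph) + 1):
--         counts = {k: len(cs) + sum(counts.get(c, 0) for c in cs)
--                   for k, cs in orbit_graph.items()}
--     return counts.get(planet, 0)
-- ===== Notes on version B (the rewrite author's own statement) =====
-- stated objective: alternative
-- what changed: Replaced the top-down recursive descent by a recursion-free bottom-up fixed-point iteration: len(graph)+1 rounds recompute a table counts[k] = len(children)+sum(counts of children), then the answer is read off for planet.
import Mathlib
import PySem

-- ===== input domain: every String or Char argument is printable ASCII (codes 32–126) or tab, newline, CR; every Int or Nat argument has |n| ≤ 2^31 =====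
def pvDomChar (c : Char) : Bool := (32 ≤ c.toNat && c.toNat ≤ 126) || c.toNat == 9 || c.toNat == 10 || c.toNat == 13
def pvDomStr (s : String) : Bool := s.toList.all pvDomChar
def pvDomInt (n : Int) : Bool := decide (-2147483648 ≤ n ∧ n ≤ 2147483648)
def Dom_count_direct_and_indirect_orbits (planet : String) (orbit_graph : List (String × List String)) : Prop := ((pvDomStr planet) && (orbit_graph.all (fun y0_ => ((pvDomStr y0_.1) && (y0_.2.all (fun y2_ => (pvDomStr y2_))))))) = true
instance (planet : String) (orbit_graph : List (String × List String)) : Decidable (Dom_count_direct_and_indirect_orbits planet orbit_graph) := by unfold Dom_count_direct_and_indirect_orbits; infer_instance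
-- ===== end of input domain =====

-- B replaces A's top-down recursion by a recursion-free bottom-up fixed-point iteration
-- (len+1 rounds recomputing a count table); alternative decomposition, not claimed faster.

-- ===== PORT A =====
-- A is recursive; the fuel (len orbit_graph + 1) only makes it total in Lean: on every
-- input admitted by Pre_ (no cycle reachable from planet) the recursion depth is at most
-- the number of distinct keys + 1, so the fuel is never exhausted and the port is exact.
def pvAFuel (fuel : Nat) (planet : String) (orbit_graph : List (String × List String)) : Int :=
  match fuel with
  | 0 => 0
  | f + 1 =>
    match (PySem.Dict.mk orbit_graph).get? planet with
    | none => 0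
    | some orbiting_planets =>
      orbiting_planets.foldl (fun n_orbits c => n_orbits + pvAFuel f c orbit_graph)
        (orbiting_planets.length : Int)

def count_direct_and_indirect_orbits (planet : String) (orbit_graph : List (String × List String)) : Int :=
  pvAFuel (orbit_graph.length + 1) planet orbit_graph

-- ===== PORT B =====
-- one round: counts = {k: len(cs) + sum(counts.get(c, 0) for c in cs) for k, cs in orbit_graph.items()}
def pvRound (orbit_graph : List (String × List String)) (counts : PySem.Dict String Int) : PySem.Dict String Int :=
  orbit_graph.foldl
    (fun acc p => acc.insert p.1 ((p.2.length : Int) + p.2.foldl (fun s c => s + counts.getD c 0) 0))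
    PySem.Dict.empty

def count_direct_and_indirect_orbits_alt (planet : String) (orbit_graph : List (String × List String)) : Int :=
  ((List.range (orbit_graph.length + 1)).foldl (fun counts _ => pvRound orbit_graph counts)
    PySem.Dict.empty).getD planet 0

-- ===== PRECONDITION & SPEC =====
-- bounded-step reachability helper used only to state Pre_ (saturates: any reachable node
-- is reached along a key-repetition-free path of length ≤ number of entries)
def pvReach (orbit_graph : List (String × List String)) : Nat → List String → List String
  | 0, s => s
  | n + 1, s =>
      pvReach orbit_graph n
        (PySem.Set.update s (s.flatMap (fun k => (PySem.Dict.mk orbit_graph).getD k [])))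

-- Pre_ excludes (a) association lists with duplicate keys, which no Python dict can denote,
-- and (b) inputs where a cycle is reachable from planet, on which Python A raises RecursionError.
def Pre_count_direct_and_indirect_orbits (planet : String) (orbit_graph : List (String × List String)) : Prop :=
  (orbit_graph.map Prod.fst).Nodup ∧
  ∀ k ∈ pvReach orbit_graph (orbit_graph.length + 1) [planet],
    k ∉ pvReach orbit_graph (orbit_graph.length + 1) ((PySem.Dict.mk orbit_graph).getD k [])

instance (planet : String) (orbit_graph : List (String × List String)) : Decidable (Pre_count_direct_and_indirect_orbits planet orbit_graph) := by unfold Pre_count_direct_and_indirect_orbits; infer_instance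

def pvWitness_count_direct_and_indirect_orbits : String × (List (String × List String)) :=
  ("COM", [("COM", ["A", "B"]), ("A", ["C"])])

def Spec_count_direct_and_indirect_orbits (planet : String) (orbit_graph : List (String × List String)) (out : Int) : Prop := out = count_direct_and_indirect_orbits_alt planet orbit_graph
instance (planet : String) (orbit_graph : List (String × List String)) (out : Int) : Decidable (Spec_count_direct_and_indirect_orbits planet orbit_graph out) := by unfold Spec_count_direct_and_indirect_orbits; infer_instance

-- ===== CLAIM (what is proved, stated in full; the proofs are below) =====
def Claim_equal_count_direct_and_indirect_orbits : Prop := ∀ (planet : String) (orbit_graph : List (String × List String)), Dom_count_direct_and_indirect_orbits planet orbit_graph → Pre_count_direct_and_indirect_orbits planet orbit_graph → Spec_count_direct_and_indirect_orbits planet orbit_graph (count_direct_and_indirect_orbits planet orbit_graph)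

-- ===== LEMMAS AND PROOFS =====

-- the inner sum of B's round, rewritten through a pointwise hypothesis on the table
theorem pv_inner_sum (g : List (String × List String)) (d : PySem.Dict String Int) (i : Nat)
    (h : ∀ c, d.getD c 0 = pvAFuel i c g) :
    ∀ (cs : List String) (init : Int),
      cs.foldl (fun s c => s + d.getD c 0) init = cs.foldl (fun s c => s + pvAFuel i c g) init := by
  intro cs
  induction cs with
  | nil => intro init; rfl
  | cons c cs ih => intro init; simp only [List.foldl_cons, h c]; exact ih _

-- one round of B, read back as one unfolding of A's recursion (first-match lookup; needs Nodup keys)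
theorem pv_round_getD_aux (g' : List (String × List String)) (acc : PySem.Dict String Int)
    (d : PySem.Dict String Int) (hnd : (g'.map Prod.fst).Nodup) (k : String) :
    (g'.foldl
      (fun acc p => acc.insert p.1 ((p.2.length : Int) + p.2.foldl (fun s c => s + d.getD c 0) 0))
      acc).getD k 0 =
    match (PySem.Dict.mk g').get? k with
    | none => acc.getD k 0
    | some cs => (cs.length : Int) + cs.foldl (fun s c => s + d.getD c 0) 0 := by
  induction g' generalizing acc with
  | nil => simp [PySem.Dict.get?]
  | cons p rest ih =>
    simp only [List.map_cons, List.nodup_cons] at hnd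
    simp only [List.foldl_cons]
    rw [ih _ hnd.2]
    rw [PySem.Dict.get?_mk_cons]
    by_cases hk : k = p.1
    · subst hk
      have hnone : (PySem.Dict.mk rest).get? p.1 = none := by
        rw [PySem.Dict.get?_eq_none_iff_not_mem_keys]
        simpa [PySem.Dict.keys] using hnd.1
      simp [hnone]
    · have hne : (p.1 == k) = false := by simp [Ne.symm hk]
      simp only [hne, Bool.false_eq_true, if_false]
      cases hrest : (PySem.Dict.mk rest).get? k with
      | none => simp [PySem.Dict.getD_insert, hk]
      | some cs => rfl

-- one round of B on the full graph, as one unfolding of A's recursion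
theorem pv_round_getD (g : List (String × List String)) (d : PySem.Dict String Int)
    (hnd : (g.map Prod.fst).Nodup) (k : String) :
    (pvRound g d).getD k 0 =
    match (PySem.Dict.mk g).get? k with
    | none => 0
    | some cs => (cs.length : Int) + cs.foldl (fun s c => s + d.getD c 0) 0 := by
  unfold pvRound
  rw [pv_round_getD_aux g PySem.Dict.empty d hnd k]
  cases (PySem.Dict.mk g).get? k <;> simp [PySem.Dict.getD_empty]

-- invariant: after i rounds the table holds exactly A's fuel-i values
theorem pv_iter_eq (g : List (String × List String)) (hnd : (g.map Prod.fst).Nodup) :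
    ∀ (i : Nat) (k : String),
      ((List.range i).foldl (fun counts _ => pvRound g counts) PySem.Dict.empty).getD k 0 =
        pvAFuel i k g := by
  intro i
  induction i with
  | zero => intro k; simp [pvAFuel, PySem.Dict.getD_empty]
  | succ i ih =>
    intro k
    rw [List.range_succ, List.foldl_append]
    simp only [List.foldl_cons, List.foldl_nil]
    rw [pv_round_getD g _ hnd k]
    cases hg : (PySem.Dict.mk g).get? k with
    | none => simp [pvAFuel, hg]
    | some cs =>
      simp only [pvAFuel, hg]
      rw [pv_inner_sum g _ i ih cs 0, PySem.List.foldl_add, PySem.List.foldl_add]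
      ring

-- ===== VERDICT (by name: the statement is the Claim_ definition above) =====
theorem count_direct_and_indirect_orbits_spec : Claim_equal_count_direct_and_indirect_orbits := by
  intro planet orbit_graph _hdom hpre
  unfold Spec_count_direct_and_indirect_orbits
  unfold count_direct_and_indirect_orbits count_direct_and_indirect_orbits_alt
  rw [pv_iter_eq orbit_graph hpre.1]
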